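-- pv_equiv track=rewrite | github.com/ctrlaltwilso/python-challenges | frequency-calculations/frequency-challenge-001.py | solution
-- ===== SOURCE A (Python) =====
-- def solution(numbers):
--     calc_nums = []
--
--     for num in numbers:
--         if num % 10 > 0:
--             calc_nums.append(num + 1)
--         else:
--             calc_nums.append(1)
--
--     calc_dict = {}
--     for num in calc_nums:
--         if num in calc_dict:
--             calc_dict[num] += 1
--         else:
--             calc_dict[num] = 1
--
--     final_output = []
--     for num, frequency in calc_dict.items():
--         final_output.append(num * frequency)
--
--     final_output.sort()
--     return final_output
-- ===== SOURCE B (Python) =====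
-- def solution(numbers):
--     calc_nums = [num + 1 if num % 10 else 1 for num in numbers]
--     calc_nums.sort()
--     products = []
--     cur = 0
--     cnt = 0
--     for v in calc_nums:
--         if cnt > 0 and v == cur:
--             cnt += 1
--         else:
--             if cnt > 0:
--                 products.append(cur * cnt)
--             cur = v
--             cnt = 1
--     if cnt > 0:
--         products.append(cur * cnt)
--     products.sort()
--     return products
-- ===== Notes on version B (the rewrite author's own statement) =====
-- stated objective: alternative
-- what changed: Replaces A's insertion-ordered dict frequency count (and its post-hoc sort of products) by sorting the transformed list once and run-length scanning equal consecutive runs to get the value*count products.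
import Mathlib
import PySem

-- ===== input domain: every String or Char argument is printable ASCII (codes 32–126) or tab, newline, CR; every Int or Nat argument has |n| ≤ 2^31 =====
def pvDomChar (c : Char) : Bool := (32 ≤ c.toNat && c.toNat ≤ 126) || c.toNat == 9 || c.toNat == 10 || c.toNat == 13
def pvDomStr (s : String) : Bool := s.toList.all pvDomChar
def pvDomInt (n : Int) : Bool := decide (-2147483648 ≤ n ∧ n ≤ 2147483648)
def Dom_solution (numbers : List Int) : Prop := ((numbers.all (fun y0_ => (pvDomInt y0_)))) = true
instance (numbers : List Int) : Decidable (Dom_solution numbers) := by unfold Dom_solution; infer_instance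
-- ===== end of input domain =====

-- B replaces A's dict-based frequency count by sort-then-group run-length counting (same return value; neither mutates the argument).

-- ===== PORT A =====
def solution (numbers : List Int) : List Int :=
  let calc_nums := numbers.foldl (fun acc num =>
    if PySem.Int.mod num 10 > 0 then acc ++ [num + 1] else acc ++ [1]) []
  let calc_dict := calc_nums.foldl (fun d num =>
    if d.contains num then d.insert num (d.getD num 0 + 1) else d.insert num 1)
    (PySem.Dict.empty : PySem.Dict Int Int)
  let final_output := calc_dict.items.foldl (fun acc p => acc ++ [p.1 * p.2]) []
  PySem.List.sorted final_output (fun x => x) false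

-- ===== PORT B =====
def solution_alt (numbers : List Int) : List Int :=
  let calc_nums := numbers.map (fun num => if PySem.Int.mod num 10 ≠ 0 then num + 1 else 1)
  let s := PySem.List.sorted calc_nums (fun x => x) false
  let st := s.foldl (fun (st : List Int × Int × Int) v =>
      if st.2.2 > 0 ∧ v = st.2.1 then (st.1, st.2.1, st.2.2 + 1)
      else ((if st.2.2 > 0 then st.1 ++ [st.2.1 * st.2.2] else st.1), v, 1))
    ([], 0, 0)
  let products := if st.2.2 > 0 then st.1 ++ [st.2.1 * st.2.2] else st.1
  PySem.List.sorted products (fun x => x) false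

-- ===== PRECONDITION & SPEC =====
def Spec_solution (numbers : List Int) (out : List Int) : Prop := out = solution_alt numbers
instance (numbers : List Int) (out : List Int) : Decidable (Spec_solution numbers out) := by unfold Spec_solution; infer_instance

-- ===== CLAIM (what is proved, stated in full; the proofs are below) =====
def Claim_equal_solution : Prop := ∀ (numbers : List Int), Dom_solution numbers → Spec_solution numbers (solution numbers)

-- ===== LEMMAS AND PROOFS =====

-- the frequency-product list (value * multiplicity over the distinct values) both programs sort
def pvG (ys : List Int) : List Int :=
  (PySem.Set.ofList ys).map (fun k => k * (ys.count k : Int))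

-- B's run-length fold step and finaliser (definitionally the port's)
def pvStep (st : List Int × Int × Int) (v : Int) : List Int × Int × Int :=
  if st.2.2 > 0 ∧ v = st.2.1 then (st.1, st.2.1, st.2.2 + 1)
  else ((if st.2.2 > 0 then st.1 ++ [st.2.1 * st.2.2] else st.1), v, 1)

def pvFin (st : List Int × Int × Int) : List Int :=
  if st.2.2 > 0 then st.1 ++ [st.2.1 * st.2.2] else st.1

theorem pv_foldl_append_pair (xs : List Int) (acc : List Int) :
    xs.foldl (fun acc num =>
      if PySem.Int.mod num 10 > 0 then acc ++ [num + 1] else acc ++ [1]) acc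
      = acc ++ xs.map (fun num => if PySem.Int.mod num 10 ≠ 0 then num + 1 else 1) := by
  induction xs generalizing acc with
  | nil => simp
  | cons x xs ih =>
    simp only [List.foldl_cons, List.map_cons, ih]
    have h0 : (0:Int) ≤ PySem.Int.mod x 10 := PySem.Int.mod_nonneg x (by norm_num)
    by_cases h : PySem.Int.mod x 10 = 0
    · rw [if_neg (by omega), if_neg (not_not_intro h)]; simp
    · rw [if_pos (by omega), if_pos h]; simp

theorem pv_dict_eq_counter (xs : List Int) :
    xs.foldl (fun d num =>
      if d.contains num then d.insert num (d.getD num 0 + 1) else d.insert num 1)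
      (PySem.Dict.empty : PySem.Dict Int Int) = PySem.Dict.counter xs := by
  rw [← PySem.Dict.foldl_insert_getD_add_one_eq_counter]
  congr 1
  funext d num
  by_cases h : d.contains num
  · simp [h]
  · have hg : d.getD num 0 = 0 := PySem.Dict.getD_of_not_contains d 0 (by simpa using h)
    rw [if_neg (by simp [h]), hg]
    norm_num

theorem pv_discard_of_not_mem (s : List Int) (x : Int) (h : x ∉ s) :
    PySem.Set.discard s x = s := by
  simp only [PySem.Set.discard]
  apply List.filter_eq_self.mpr
  intro a ha
  simp only [Bool.not_eq_true', beq_eq_false_iff_ne, ne_eq]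
  exact fun e => h (e ▸ ha)

theorem pv_ofList_rep_append (n : Nat) (hn : 0 < n) (x : Int) (t : List Int) (hx : x ∉ t) :
    PySem.Set.ofList (List.replicate n x ++ t) = x :: PySem.Set.ofList t := by
  induction n with
  | zero => omega
  | succ m ih =>
    by_cases hm : 0 < m
    · rw [List.replicate_succ, List.cons_append, PySem.Set.ofList_cons, ih hm]
      simp only [PySem.Set.discard, List.filter_cons]
      rw [show ((!x == x) = false) by simp]
      simp only [if_neg Bool.false_ne_true]
      rw [List.filter_eq_self.mpr]
      intro a ha
      simp only [Bool.not_eq_true', beq_eq_false_iff_ne, ne_eq]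
      have : a ∈ t := (PySem.Set.mem_ofList t a).mp ha
      exact fun e => hx (e ▸ this)
    · have : m = 0 := by omega
      subst this
      rw [List.replicate_one, List.singleton_append, PySem.Set.ofList_cons,
        pv_discard_of_not_mem _ _ (by simp [PySem.Set.mem_ofList, hx])]

theorem pv_loop (s : List Int) (acc : List Int) (cur : Int) (n : Nat) (hn : 0 < n)
    (hle : ∀ x ∈ s, cur ≤ x) (hs : s.Pairwise (· ≤ ·)) :
    pvFin (s.foldl pvStep (acc, cur, (n : Int)))
      = acc ++ pvG (List.replicate n cur ++ s) := by
  induction s generalizing acc cur n with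
  | nil =>
    simp only [List.foldl_nil, pvFin, List.append_nil]
    rw [if_pos (by exact_mod_cast hn)]
    have h1 : PySem.Set.ofList (List.replicate n cur) = [cur] := by
      have := pv_ofList_rep_append n hn cur [] (by simp)
      simpa using this
    simp [pvG, h1, List.count_replicate]
  | cons v s ih =>
    have hcv : cur ≤ v := hle v (by simp)
    by_cases he : v = cur
    · subst he
      simp only [List.foldl_cons]
      rw [show pvStep (acc, v, (n:Int)) v = (acc, v, ((n+1 : Nat) : Int)) by
        simp only [pvStep]; rw [if_pos ⟨by exact_mod_cast hn, trivial⟩]; push_cast; rfl]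
      rw [ih acc v (n+1) (by omega) (fun x hx => (List.pairwise_cons.mp hs).1 x hx)
        (List.pairwise_cons.mp hs).2]
      congr 2
      rw [List.replicate_succ' ]
      simp
    · have hlt : cur < v := lt_of_le_of_ne hcv (Ne.symm he)
      have hnotmem : cur ∉ v :: s := by
        intro hm
        rcases List.mem_cons.mp hm with h1 | h1
        · exact he h1.symm
        · exact absurd ((List.pairwise_cons.mp hs).1 cur h1) (by omega)
      simp only [List.foldl_cons]
      rw [show pvStep (acc, cur, (n:Int)) v = (acc ++ [cur * n], v, ((1:Nat):Int)) by
        simp only [pvStep]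
        rw [if_neg (fun hc => he hc.2), if_pos (by exact_mod_cast hn)]
        norm_num]
      rw [ih (acc ++ [cur * n]) v 1 (by omega) (fun x hx => (List.pairwise_cons.mp hs).1 x hx) (List.pairwise_cons.mp hs).2]
      rw [List.append_assoc]
      congr 1
      rw [List.replicate_one, List.singleton_append]
      -- goal: [cur * n] ++ pvG (v :: s) = pvG (replicate n cur ++ v :: s)
      simp only [pvG]
      rw [pv_ofList_rep_append n hn cur (v :: s) hnotmem]
      simp only [List.map_cons, List.singleton_append]
      congr 1
      · rw [List.count_append, List.count_eq_zero.mpr hnotmem]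
        simp [List.count_replicate_self]
      · apply List.map_congr_left
        intro k hk
        have hk' : k ∈ v :: s := (PySem.Set.mem_ofList _ _).mp hk
        have hkne : k ≠ cur := fun e => hnotmem (e ▸ hk')
        have hz : List.count k (List.replicate n cur) = 0 := by
          simp [List.count_replicate]
          exact fun e => absurd e.symm hkne
        rw [List.count_append, hz]
        simp

theorem pv_rle (s : List Int) (hs : s.Pairwise (· ≤ ·)) :
    pvFin (s.foldl pvStep ([], 0, 0)) = pvG s := by
  cases s with
  | nil => rfl
  | cons v rest =>
    simp only [List.foldl_cons]
    rw [show pvStep ([], 0, 0) v = ([], v, ((1:Nat):Int)) by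
      simp only [pvStep]; rw [if_neg (by simp)]; norm_num]
    rw [pv_loop rest [] v 1 (by omega) (fun x hx => (List.pairwise_cons.mp hs).1 x hx)
      (List.pairwise_cons.mp hs).2]
    simp

theorem pv_g_perm (xs ys : List Int) (h : xs.Perm ys) : (pvG xs).Perm (pvG ys) := by
  have hf : (fun k => k * ((ys.count k : Nat) : Int)) = (fun k => k * ((xs.count k : Nat) : Int)) := by
    funext k
    rw [h.count_eq]
  have hset : (PySem.Set.ofList xs).Perm (PySem.Set.ofList ys) := by
    rw [List.perm_ext_iff_of_nodup (PySem.Set.nodup_ofList xs) (PySem.Set.nodup_ofList ys)]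
    intro a
    rw [PySem.Set.mem_ofList, PySem.Set.mem_ofList]
    exact h.mem_iff
  simp only [pvG, hf]
  exact hset.map _

-- ===== VERDICT (by name: the statement is the Claim_ definition above) =====
theorem solution_spec : Claim_equal_solution := by
  intro numbers _
  show solution numbers = solution_alt numbers
  have hA : solution numbers
      = PySem.List.sorted (pvG (numbers.map (fun num => if PySem.Int.mod num 10 ≠ 0 then num + 1 else 1))) (fun x => x) false := by
    simp only [solution]
    rw [pv_foldl_append_pair, List.nil_append, pv_dict_eq_counter, PySem.Dict.items_counter,
      PySem.List.foldl_append_singleton_eq_map, List.map_map]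
    rfl
  have hB : solution_alt numbers
      = PySem.List.sorted (pvG (PySem.List.sorted (numbers.map (fun num => if PySem.Int.mod num 10 ≠ 0 then num + 1 else 1)) (fun x => x) false)) (fun x => x) false := by
    simp only [solution_alt]
    rw [show ∀ (l : List Int), l.foldl (fun (st : List Int × Int × Int) v =>
        if st.2.2 > 0 ∧ v = st.2.1 then (st.1, st.2.1, st.2.2 + 1)
        else ((if st.2.2 > 0 then st.1 ++ [st.2.1 * st.2.2] else st.1), v, 1)) ([], 0, 0)
        = l.foldl pvStep ([], 0, 0) from fun l => rfl]
    rw [show ∀ (st : List Int × Int × Int),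
        (if st.2.2 > 0 then st.1 ++ [st.2.1 * st.2.2] else st.1) = pvFin st from fun st => rfl]
    rw [pv_rle _ (by
      have := PySem.List.sorted_pairwise (numbers.map (fun num => if PySem.Int.mod num 10 ≠ 0 then num + 1 else 1)) (fun x => x)
      exact this)]
  rw [hA, hB]
  exact PySem.List.sorted_eq_sorted_of_perm _ _ _ (fun a b hab => hab)
    (pv_g_perm _ _ (PySem.List.sorted_perm _ _ _)).symm
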